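-- pv_equiv track=rewrite | github.com/PranjalMantri/Beam-Detection-and-Processing | src/data/bars.py | segment_lines
-- ===== SOURCE A (Python) =====
-- def segment_lines(lines, max_diff=5):
--     horizontal_lines, vertical_lines, slanted_lines = [], [], []
--     for line in lines:
--         x1, y1, x2, y2 = line[0]
--         if abs(x1 - x2) <= max_diff:
--             vertical_lines.append([x1, y1, x2, y2])
--         elif abs(y1 - y2) <= max_diff:
--             horizontal_lines.append([x1, y1, x2, y2])
--         else:
--             slanted_lines.append([x1, y1, x2, y2])
--     return horizontal_lines, vertical_lines, slanted_lines
-- ===== SOURCE B (Python) =====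
-- def segment_lines(lines, max_diff=5):
--     quads = [line[0] for line in lines]
--     horizontal_lines = [[x1, y1, x2, y2] for x1, y1, x2, y2 in quads
--                         if abs(x1 - x2) > max_diff and abs(y1 - y2) <= max_diff]
--     vertical_lines = [[x1, y1, x2, y2] for x1, y1, x2, y2 in quads
--                       if abs(x1 - x2) <= max_diff]
--     slanted_lines = [[x1, y1, x2, y2] for x1, y1, x2, y2 in quads
--                      if abs(x1 - x2) > max_diff and abs(y1 - y2) > max_diff]
--     return horizontal_lines, vertical_lines, slanted_lines
-- ===== Notes on version B (the rewrite author's own statement) =====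
-- stated objective: idiomatic
-- what changed: Replaced the single accumulating loop with three independent filtered list comprehensions, one per category, with the vertical-first priority encoded in the predicates.
import Mathlib
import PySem

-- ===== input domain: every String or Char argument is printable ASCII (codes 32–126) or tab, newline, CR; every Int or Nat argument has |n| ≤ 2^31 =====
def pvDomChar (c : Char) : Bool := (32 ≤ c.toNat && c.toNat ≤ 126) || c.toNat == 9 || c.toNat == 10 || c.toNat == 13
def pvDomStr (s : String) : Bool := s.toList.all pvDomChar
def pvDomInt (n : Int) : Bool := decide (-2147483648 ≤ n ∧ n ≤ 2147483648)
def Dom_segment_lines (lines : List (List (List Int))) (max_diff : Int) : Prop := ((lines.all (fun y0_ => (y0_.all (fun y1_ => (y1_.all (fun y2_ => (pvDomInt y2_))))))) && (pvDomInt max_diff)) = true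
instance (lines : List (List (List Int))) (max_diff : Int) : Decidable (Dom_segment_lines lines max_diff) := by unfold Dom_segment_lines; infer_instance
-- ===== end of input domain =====

-- B replaces A's single accumulating loop by three independent filtered passes (idiomatic comprehensions); equivalence proved on inputs where each line's first element is a 4-tuple.


-- ===== PORT A =====
-- the for-loop with its three accumulators, appending at the back as Python's append does
def segAStep (max_diff : Int) (acc : List (List Int) × List (List Int) × List (List Int))
    (line : List (List Int)) : List (List Int) × List (List Int) × List (List Int) :=
  match line with
  | [x1, y1, x2, y2] :: _ =>
    if |x1 - x2| ≤ max_diff then (acc.1, acc.2.1 ++ [[x1, y1, x2, y2]], acc.2.2)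
    else if |y1 - y2| ≤ max_diff then (acc.1 ++ [[x1, y1, x2, y2]], acc.2.1, acc.2.2)
    else (acc.1, acc.2.1, acc.2.2 ++ [[x1, y1, x2, y2]])
  | _ => acc  -- Python raises here (IndexError/ValueError); excluded by Pre_

def segment_lines (lines : List (List (List Int))) (max_diff : Int) :
    List (List Int) × List (List Int) × List (List Int) :=
  lines.foldl (segAStep max_diff) ([], [], [])

-- ===== PORT B =====
def segQuad (line : List (List Int)) : List Int :=
  match line with
  | q :: _ => q
  | [] => []  -- unreachable under Pre_

def segment_lines_alt (lines : List (List (List Int))) (max_diff : Int) :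
    List (List Int) × List (List Int) × List (List Int) :=
  let quads := lines.map segQuad
  let horizontal_lines := (quads.filter (fun q =>
    match q with
    | [x1, y1, x2, y2] => decide (|x1 - x2| > max_diff ∧ |y1 - y2| ≤ max_diff)
    | _ => false)).map (fun q => q)
  let vertical_lines := (quads.filter (fun q =>
    match q with
    | [x1, _, x2, _] => decide (|x1 - x2| ≤ max_diff)
    | _ => false)).map (fun q => q)
  let slanted_lines := (quads.filter (fun q =>
    match q with
    | [x1, y1, x2, y2] => decide (|x1 - x2| > max_diff ∧ |y1 - y2| > max_diff)
    | _ => false)).map (fun q => q)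
  (horizontal_lines, vertical_lines, slanted_lines)

-- ===== PRECONDITION & SPEC =====
-- Pre_ excludes inputs where Python A raises: a line with no elements (IndexError) or a
-- first element that is not a 4-tuple (unpacking ValueError).
def Pre_segment_lines (lines : List (List (List Int))) (max_diff : Int) : Prop :=
  (lines.all (fun line =>
    match line with
    | q :: _ => q.length == 4
    | [] => false)) = true

instance (lines : List (List (List Int))) (max_diff : Int) : Decidable (Pre_segment_lines lines max_diff) := by unfold Pre_segment_lines; infer_instance

def pvWitness_segment_lines : List (List (List Int)) × Int :=
  ([[[0, 0, 0, 9]], [[0, 0, 9, 0]], [[0, 0, 9, 9]]], 5)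

def Spec_segment_lines (lines : List (List (List Int))) (max_diff : Int) (out : List (List Int) × List (List Int) × List (List Int)) : Prop := out = segment_lines_alt lines max_diff
instance (lines : List (List (List Int))) (max_diff : Int) (out : List (List Int) × List (List Int) × List (List Int)) : Decidable (Spec_segment_lines lines max_diff out) := by unfold Spec_segment_lines; infer_instance

-- ===== CLAIM =====
def Claim_equal_segment_lines : Prop := ∀ (lines : List (List (List Int))) (max_diff : Int), Dom_segment_lines lines max_diff → Pre_segment_lines lines max_diff → Spec_segment_lines lines max_diff (segment_lines lines max_diff)

-- ===== LEMMAS AND PROOFS =====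

-- the key invariant: folding A's step from any accumulator appends B's three filters
theorem segA_fold_append (max_diff : Int) (lines : List (List (List Int)))
    (acc : List (List Int) × List (List Int) × List (List Int))
    (h : Pre_segment_lines lines max_diff) :
    lines.foldl (segAStep max_diff) acc =
      (acc.1 ++ (segment_lines_alt lines max_diff).1,
       acc.2.1 ++ (segment_lines_alt lines max_diff).2.1,
       acc.2.2 ++ (segment_lines_alt lines max_diff).2.2) := by
  induction lines generalizing acc with
  | nil => simp [segment_lines_alt]
  | cons l ls ih =>
    simp only [Pre_segment_lines, List.all_cons, Bool.and_eq_true] at h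
    obtain ⟨hl, hls⟩ := h
    match l with
    | [] => simp at hl
    | q :: rest =>
      match q, hl with
      | [x1, y1, x2, y2], _ =>
        simp only [List.foldl_cons]
        rw [ih _ hls]
        simp only [segAStep, segment_lines_alt, segQuad, List.map_cons, List.filter_cons]
        by_cases h1 : |x1 - x2| ≤ max_diff
        · simp [h1, not_lt.mpr h1]
        · by_cases h2 : |y1 - y2| ≤ max_diff
          · simp [h1, h2, lt_of_not_ge h1, not_lt.mpr h2]
          · simp [h1, h2, lt_of_not_ge h1, lt_of_not_ge h2]

-- ===== VERDICT =====
theorem segment_lines_spec : Claim_equal_segment_lines := by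
  intro lines max_diff _ hpre
  unfold Spec_segment_lines segment_lines
  rw [segA_fold_append max_diff lines ([], [], []) hpre]
  simp
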